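-- pv_equiv track=rewrite | github.com/danny305/pdb2pqr | pdb2pqr/io.py | generate_atom_site_columns
-- ===== SOURCE A (Python) =====
-- def generate_atom_site_columns(pdb_lines):
--
--     col_idx = {
--         'group_PDB': 0,
--         'id': 1,
--         'type_symbol': 2,
--
--         'label_atom_id': 19,    # Not using label_atom_id; just auth_atom_id
--         'label_alt_id': 4,
--         'label_comp_id': 5,
--         'label_asym_id': 6,
--         'label_entity_id': 7,
--         'label_seq_id': 8,
--
--         'pdbx_PDB_ins_code': 9,
--
--         'Cartn_x': 10,
--         'Cartn_y': 11,
--         'Cartn_z': 12,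
--
--         'occupancy': 13,
--         'B_iso_or_equiv': 14,
--         'pdbx_formal_charge': 15, # this will not be added to the file should be set to '?'
--
--         'auth_seq_id': 16,
--         'auth_comp_id': 17,
--         'auth_asym_id': 18,
--         'auth_atom_id': 19,
--
--         'pdbx_PDB_model_num': 20,
--     }
--
--     group_PDB, id_, type_symbol = [], [], []
--     label_atom_id, label_alt_id, label_comp_id = [], [], []
--     label_asym_id, label_entity_id, label_seq_id = [], [], []
--     pdbx_PDB_ins_code = []
--     Cartn_x, Cartn_y, Cartn_z = [], [], []
--     occupancy, B_iso_or_equiv, pdbx_formal_charge = [], [], []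
--     auth_seq_id, auth_comp_id, auth_asym_id, auth_atom_id = [], [], [], []
--     pdbx_PDB_model_num = []
--
-- #     # TODO assert len(line.split()) 2 lengths allowed - with pqr and radii and without it.
--
--     for line in pdb_lines:
--         line = line.split()
--
--         # 23: no partial_charge and radii columns
--         # 25: includes partial_charge and radii_columns
--         if not len(line) in [23, 25]:
--             continue
--
--         group_PDB.append(line[col_idx['group_PDB']])
--         id_.append(line[col_idx['id']])
--         type_symbol.append(line[col_idx['type_symbol']])
--
--         label_atom_id.append(line[col_idx['label_atom_id']])
--         label_alt_id.append(line[col_idx['label_alt_id']])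
--         label_comp_id.append(line[col_idx['label_comp_id']])
--
--         label_asym_id.append(line[col_idx['label_asym_id']])
--         label_entity_id.append(line[col_idx['label_entity_id']])
--         label_seq_id.append(line[col_idx['label_seq_id']])
--
--         pdbx_PDB_ins_code.append(line[col_idx['pdbx_PDB_ins_code']])
--
--         Cartn_x.append(line[col_idx['Cartn_x']])
--         Cartn_y.append(line[col_idx['Cartn_y']])
--         Cartn_z.append(line[col_idx['Cartn_z']])
--
--         occupancy.append(line[col_idx['occupancy']])
--         B_iso_or_equiv.append(line[col_idx['B_iso_or_equiv']])
--         pdbx_formal_charge.append(line[col_idx['pdbx_formal_charge']])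
--
--         auth_seq_id.append(line[col_idx['auth_seq_id']])
--         auth_comp_id.append(line[col_idx['auth_comp_id']])
--         auth_asym_id.append(line[col_idx['auth_asym_id']])
--         auth_atom_id.append(line[col_idx['auth_atom_id']])
--
--         pdbx_PDB_model_num.append(line[col_idx['pdbx_PDB_model_num']])
--
--
--     return (
--         group_PDB, id_, type_symbol, label_atom_id, label_alt_id, label_comp_id,
--         label_asym_id, label_entity_id, label_seq_id, pdbx_PDB_ins_code,
--         Cartn_x, Cartn_y, Cartn_z, occupancy, B_iso_or_equiv, pdbx_formal_charge,
--         auth_seq_id, auth_comp_id, auth_asym_id, auth_atom_id, pdbx_PDB_model_num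
--     )
-- ===== SOURCE B (Python) =====
-- def generate_atom_site_columns(pdb_lines):
--     # gather-then-project: collect valid token rows once, then build each column
--     rows = [t for t in (line.split() for line in pdb_lines) if len(t) in (23, 25)]
--     idxs = (0, 1, 2, 19, 4, 5, 6, 7, 8, 9, 10, 11, 12, 13, 14, 15, 16, 17, 18, 19, 20)
--     return tuple([r[i] for r in rows] for i in idxs)
-- ===== Notes on version B (the rewrite author's own statement) =====
-- stated objective: simpler
-- what changed: Replaces the 21-accumulator loop by a gather-then-project form: one pass collects the valid token rows, then each output column is a projection of that row list.
import Mathlib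
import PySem

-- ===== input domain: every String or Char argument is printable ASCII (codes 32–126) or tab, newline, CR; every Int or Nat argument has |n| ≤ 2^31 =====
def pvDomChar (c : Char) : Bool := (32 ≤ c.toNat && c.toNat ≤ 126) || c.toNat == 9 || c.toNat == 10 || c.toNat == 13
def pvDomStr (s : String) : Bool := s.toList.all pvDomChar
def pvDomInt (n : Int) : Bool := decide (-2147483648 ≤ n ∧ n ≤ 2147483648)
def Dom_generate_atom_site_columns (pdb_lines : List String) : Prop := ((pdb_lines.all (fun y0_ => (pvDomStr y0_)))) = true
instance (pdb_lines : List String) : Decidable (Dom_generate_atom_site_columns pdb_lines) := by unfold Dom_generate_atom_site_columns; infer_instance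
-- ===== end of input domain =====

-- B replaces A's 21-accumulator loop by a gather-then-project decomposition (same cost).

-- ===== PORT A =====
-- the 21-component state of A's loop (21 accumulator lists, in A's return order)
abbrev PvCols := List String × List String × List String × List String × List String × List String × List String × List String × List String × List String × List String × List String × List String × List String × List String × List String × List String × List String × List String × List String × List String

-- one iteration of A's `for line in pdb_lines` loop
def pvStepA (st : PvCols) (line : String) : PvCols :=
  let row := PySem.Str.split₀ line
  if ¬ (row.length = 23 ∨ row.length = 25) then st
  else
    match st with
    | (c0, c1, c2, c3, c4, c5, c6, c7, c8, c9, c10, c11, c12, c13, c14, c15, c16, c17, c18, c19, c20) =>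
      (c0 ++ [PySem.List.pyGetD row 0 ""], c1 ++ [PySem.List.pyGetD row 1 ""],
       c2 ++ [PySem.List.pyGetD row 2 ""], c3 ++ [PySem.List.pyGetD row 19 ""],
       c4 ++ [PySem.List.pyGetD row 4 ""], c5 ++ [PySem.List.pyGetD row 5 ""],
       c6 ++ [PySem.List.pyGetD row 6 ""], c7 ++ [PySem.List.pyGetD row 7 ""],
       c8 ++ [PySem.List.pyGetD row 8 ""], c9 ++ [PySem.List.pyGetD row 9 ""],
       c10 ++ [PySem.List.pyGetD row 10 ""], c11 ++ [PySem.List.pyGetD row 11 ""],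
       c12 ++ [PySem.List.pyGetD row 12 ""], c13 ++ [PySem.List.pyGetD row 13 ""],
       c14 ++ [PySem.List.pyGetD row 14 ""], c15 ++ [PySem.List.pyGetD row 15 ""],
       c16 ++ [PySem.List.pyGetD row 16 ""], c17 ++ [PySem.List.pyGetD row 17 ""],
       c18 ++ [PySem.List.pyGetD row 18 ""], c19 ++ [PySem.List.pyGetD row 19 ""],
       c20 ++ [PySem.List.pyGetD row 20 ""])

def generate_atom_site_columns (pdb_lines : List String) : PvCols :=
  pdb_lines.foldl pvStepA
    ([], [], [], [], [], [], [], [], [], [], [], [], [], [], [], [], [], [], [], [], [])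

-- ===== PORT B =====
-- Source B: rows = the valid token rows; each column is a projection of `rows`
def pvRows (pdb_lines : List String) : List (List String) :=
  (pdb_lines.map PySem.Str.split₀).filter (fun t => t.length == 23 || t.length == 25)

def pvCol (rows : List (List String)) (i : Int) : List String :=
  rows.map (fun r => PySem.List.pyGetD r i "")

def generate_atom_site_columns_alt (pdb_lines : List String) : PvCols :=
  let rows := pvRows pdb_lines
  (pvCol rows 0, pvCol rows 1, pvCol rows 2, pvCol rows 19, pvCol rows 4, pvCol rows 5,
   pvCol rows 6, pvCol rows 7, pvCol rows 8, pvCol rows 9, pvCol rows 10, pvCol rows 11,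
   pvCol rows 12, pvCol rows 13, pvCol rows 14, pvCol rows 15, pvCol rows 16, pvCol rows 17,
   pvCol rows 18, pvCol rows 19, pvCol rows 20)

-- ===== PRECONDITION & SPEC =====
def Spec_generate_atom_site_columns (pdb_lines : List String) (out : PvCols) : Prop := out = generate_atom_site_columns_alt pdb_lines
-- DecidableEq for the 21-component product, built stepwise (default instance search gives up at this size)
def pvDecEqP : DecidableEq PvCols := by
  letI : DecidableEq (List String × List String) := instDecidableEqProd
  letI : DecidableEq (List String × List String × List String) := instDecidableEqProd
  letI : DecidableEq (List String × List String × List String × List String) := instDecidableEqProd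
  letI : DecidableEq (List String × List String × List String × List String × List String) := instDecidableEqProd
  letI : DecidableEq (List String × List String × List String × List String × List String × List String) := instDecidableEqProd
  letI : DecidableEq (List String × List String × List String × List String × List String × List String × List String) := instDecidableEqProd
  letI : DecidableEq (List String × List String × List String × List String × List String × List String × List String × List String) := instDecidableEqProd
  letI : DecidableEq (List String × List String × List String × List String × List String × List String × List String × List String × List String) := instDecidableEqProd
  letI : DecidableEq (List String × List String × List String × List String × List String × List String × List String × List String × List String × List String) := instDecidableEqProd
  letI : DecidableEq (List String × List String × List String × List String × List String × List String × List String × List String × List String × List String × List String) := instDecidableEqProd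
  letI : DecidableEq (List String × List String × List String × List String × List String × List String × List String × List String × List String × List String × List String × List String) := instDecidableEqProd
  letI : DecidableEq (List String × List String × List String × List String × List String × List String × List String × List String × List String × List String × List String × List String × List String) := instDecidableEqProd
  letI : DecidableEq (List String × List String × List String × List String × List String × List String × List String × List String × List String × List String × List String × List String × List String × List String) := instDecidableEqProd
  letI : DecidableEq (List String × List String × List String × List String × List String × List String × List String × List String × List String × List String × List String × List String × List String × List String × List String) := instDecidableEqProd
  letI : DecidableEq (List String × List String × List String × List String × List String × List String × List String × List String × List String × List String × List String × List String × List String × List String × List String × List String) := instDecidableEqProd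
  letI : DecidableEq (List String × List String × List String × List String × List String × List String × List String × List String × List String × List String × List String × List String × List String × List String × List String × List String × List String) := instDecidableEqProd
  letI : DecidableEq (List String × List String × List String × List String × List String × List String × List String × List String × List String × List String × List String × List String × List String × List String × List String × List String × List String × List String) := instDecidableEqProd
  letI : DecidableEq (List String × List String × List String × List String × List String × List String × List String × List String × List String × List String × List String × List String × List String × List String × List String × List String × List String × List String × List String) := instDecidableEqProd
  letI : DecidableEq (List String × List String × List String × List String × List String × List String × List String × List String × List String × List String × List String × List String × List String × List String × List String × List String × List String × List String × List String × List String) := instDecidableEqProd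
  exact instDecidableEqProd

instance (pdb_lines : List String) (out : PvCols) : Decidable (Spec_generate_atom_site_columns pdb_lines out) := by unfold Spec_generate_atom_site_columns; exact pvDecEqP _ _

-- ===== CLAIM (what is proved, stated in full; the proofs are below) =====
def Claim_equal_generate_atom_site_columns : Prop := ∀ (pdb_lines : List String), Dom_generate_atom_site_columns pdb_lines → Spec_generate_atom_site_columns pdb_lines (generate_atom_site_columns pdb_lines)

-- ===== LEMMAS AND PROOFS =====

-- A's loop from an arbitrary state appends B's columns componentwise
lemma pvFoldA_eq (ls : List String) : ∀ (st : PvCols),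
    ls.foldl pvStepA st =
      (st.1 ++ pvCol (pvRows ls) 0, st.2.1 ++ pvCol (pvRows ls) 1,
       st.2.2.1 ++ pvCol (pvRows ls) 2, st.2.2.2.1 ++ pvCol (pvRows ls) 19,
       st.2.2.2.2.1 ++ pvCol (pvRows ls) 4, st.2.2.2.2.2.1 ++ pvCol (pvRows ls) 5,
       st.2.2.2.2.2.2.1 ++ pvCol (pvRows ls) 6, st.2.2.2.2.2.2.2.1 ++ pvCol (pvRows ls) 7,
       st.2.2.2.2.2.2.2.2.1 ++ pvCol (pvRows ls) 8, st.2.2.2.2.2.2.2.2.2.1 ++ pvCol (pvRows ls) 9,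
       st.2.2.2.2.2.2.2.2.2.2.1 ++ pvCol (pvRows ls) 10, st.2.2.2.2.2.2.2.2.2.2.2.1 ++ pvCol (pvRows ls) 11,
       st.2.2.2.2.2.2.2.2.2.2.2.2.1 ++ pvCol (pvRows ls) 12, st.2.2.2.2.2.2.2.2.2.2.2.2.2.1 ++ pvCol (pvRows ls) 13,
       st.2.2.2.2.2.2.2.2.2.2.2.2.2.2.1 ++ pvCol (pvRows ls) 14, st.2.2.2.2.2.2.2.2.2.2.2.2.2.2.2.1 ++ pvCol (pvRows ls) 15,
       st.2.2.2.2.2.2.2.2.2.2.2.2.2.2.2.2.1 ++ pvCol (pvRows ls) 16, st.2.2.2.2.2.2.2.2.2.2.2.2.2.2.2.2.2.1 ++ pvCol (pvRows ls) 17,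
       st.2.2.2.2.2.2.2.2.2.2.2.2.2.2.2.2.2.2.1 ++ pvCol (pvRows ls) 18, st.2.2.2.2.2.2.2.2.2.2.2.2.2.2.2.2.2.2.2.1 ++ pvCol (pvRows ls) 19,
       st.2.2.2.2.2.2.2.2.2.2.2.2.2.2.2.2.2.2.2.2 ++ pvCol (pvRows ls) 20) := by
  induction ls with
  | nil => intro st; simp [pvRows, pvCol]
  | cons l ls ih =>
    intro st
    obtain ⟨c0, c1, c2, c3, c4, c5, c6, c7, c8, c9, c10, c11, c12, c13, c14, c15, c16, c17, c18, c19, c20⟩ := st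
    by_cases h : (PySem.Str.split₀ l).length = 23 ∨ (PySem.Str.split₀ l).length = 25
    · simp only [List.foldl_cons, pvStepA, h, not_true_eq_false, if_false, ih]
      simp [pvRows, pvCol, h, List.append_assoc]
    · have hb : ¬ ((PySem.Str.split₀ l).length == 23 || (PySem.Str.split₀ l).length == 25) = true := by
        simpa [not_or] using h
      simp only [List.foldl_cons, pvStepA, h, not_false_eq_true, if_true, ih]
      simp [pvRows, pvCol, hb]

-- ===== VERDICT (by name: the statement is the Claim_ definition above) =====
theorem generate_atom_site_columns_spec : Claim_equal_generate_atom_site_columns := by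
  intro ls _
  unfold Spec_generate_atom_site_columns generate_atom_site_columns generate_atom_site_columns_alt
  simp [pvFoldA_eq]
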